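-- pv_equiv track=rewrite | github.com/GabrieleConsonni/qsmith | app/elaborations/services/suite_runs/run_context.py | _segment_tokens
-- ===== SOURCE A (Python) =====
-- def _segment_tokens(segment: str) -> list[str]:
--     source = str(segment or "").strip()
--     if not source:
--         return []
--     result: list[str] = []
--     buffer: list[str] = []
--     index_mode = False
--     for char in source:
--         if char == "[":
--             if buffer:
--                 result.append("".join(buffer))
--                 buffer = []
--             index_mode = True
--             continue
--         if char == "]":
--             token = "".join(buffer).strip()
--             if token:
--                 result.append(token)
--             buffer = []
--             index_mode = False
--             continue
--         buffer.append(char)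
--     if buffer:
--         result.append("".join(buffer) if not index_mode else "".join(buffer).strip())
--     return [token for token in result if token]
-- ===== SOURCE B (Python) =====
-- def _segment_tokens(segment: str) -> list[str]:
--     source = str(segment or "").strip()
--     tokens: list[str] = []
--
--     def go(s: str, after_open: bool) -> None:
--         for i, c in enumerate(s):
--             if c in "[]":
--                 frag = s[:i]
--                 tokens.append(frag.strip() if c == "]" else frag)
--                 go(s[i + 1:], c == "[")
--                 return
--         tokens.append(s.strip() if after_open else s)
--
--     go(source, False)
--     return [t for t in tokens if t]
-- ===== Notes on version B (the rewrite author's own statement) =====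
-- stated objective: idiomatic
-- what changed: A's char-by-char state machine (buffer list + index_mode flag) is replaced by a fragment-level recursive decomposition that splits off the text before each bracket and applies the strip rule per whole fragment.
import Mathlib
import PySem

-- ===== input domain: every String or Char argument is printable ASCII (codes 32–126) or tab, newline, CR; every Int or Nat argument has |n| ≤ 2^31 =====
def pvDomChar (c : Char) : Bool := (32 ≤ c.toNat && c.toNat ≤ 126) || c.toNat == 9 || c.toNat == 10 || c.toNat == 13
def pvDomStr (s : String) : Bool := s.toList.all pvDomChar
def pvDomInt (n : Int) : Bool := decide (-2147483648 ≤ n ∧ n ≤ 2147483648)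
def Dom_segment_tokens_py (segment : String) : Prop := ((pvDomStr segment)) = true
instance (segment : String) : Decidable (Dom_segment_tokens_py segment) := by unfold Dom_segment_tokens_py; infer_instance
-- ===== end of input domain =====

-- B replaces A's char-by-char buffer/flag state machine by a fragment-level recursive
-- decomposition (split off the text up to the next bracket, decide the strip rule per
-- fragment, recurse on the rest); objective: simpler/idiomatic, no speed claim.

-- ===== PORT A =====
-- state: (result, buffer, index_mode); one step of A's for-loop over the characters
def pvStepA (st : List (List Char) × List Char × Bool) (c : Char) :
    List (List Char) × List Char × Bool :=
  let result := st.1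
  let buffer := st.2.1
  let indexMode := st.2.2
  if c = '[' then
    ((if buffer ≠ [] then result ++ [buffer] else result), [], true)
  else if c = ']' then
    (let token := PySem.Chars.strip buffer
     ((if token ≠ [] then result ++ [token] else result), [], false))
  else
    (result, buffer ++ [c], indexMode)

def segment_tokens_py (segment : String) : List String :=
  let source := PySem.Chars.strip segment.toList
  if source = [] then []
  else
    let st := source.foldl pvStepA ([], [], false)
    let result := st.1
    let buffer := st.2.1
    let indexMode := st.2.2
    let result :=
      if buffer ≠ [] then
        result ++ [if indexMode then PySem.Chars.strip buffer else buffer]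
      else result
    (result.filter (· ≠ [])).map (fun l => String.ofList l)

-- ===== PORT B =====
-- split off the text before the first bracket: some (pre, delim, rest), none if no bracket
def pvSplitFirst : List Char → Option (List Char × Char × List Char)
  | [] => none
  | c :: rest =>
    if c = '[' ∨ c = ']' then some ([], c, rest)
    else
      match pvSplitFirst rest with
      | none => none
      | some (pre, d, post) => some (c :: pre, d, post)

theorem pvSplitFirst_length_lt :
    ∀ (s pre post : List Char) (d : Char),
      pvSplitFirst s = some (pre, d, post) → post.length < s.length := by
  intro s
  induction s with
  | nil => intro pre post d h; simp [pvSplitFirst] at h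
  | cons c rest ih =>
    intro pre post d h
    by_cases hc : c = '[' ∨ c = ']'
    · simp only [pvSplitFirst, if_pos hc, Option.some.injEq, Prod.mk.injEq] at h
      obtain ⟨-, -, h3⟩ := h
      subst h3
      simp
    · simp only [pvSplitFirst, if_neg hc] at h
      cases hr : pvSplitFirst rest with
      | none => rw [hr] at h; cases h
      | some v =>
        obtain ⟨p, d', q⟩ := v
        rw [hr] at h
        simp only [Option.some.injEq, Prod.mk.injEq] at h
        obtain ⟨-, -, h3⟩ := h
        subst h3
        have := ih p q d' hr
        simp
        omega

-- the recursive walk: each fragment with the bracket that follows it, carrying whether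
-- the previous delimiter was '['
def pvGoB (s : List Char) (afterOpen : Bool) : List (List Char) :=
  match h : pvSplitFirst s with
  | none => [if afterOpen then PySem.Chars.strip s else s]
  | some (pre, d, post) =>
    (if d = ']' then PySem.Chars.strip pre else pre) :: pvGoB post (d = '[')
termination_by s.length
decreasing_by exact pvSplitFirst_length_lt s pre post d h

def segment_tokens_py_alt (segment : String) : List String :=
  let source := PySem.Chars.strip segment.toList
  ((pvGoB source false).filter (· ≠ [])).map (fun l => String.ofList l)

-- ===== PRECONDITION & SPEC =====
def Spec_segment_tokens_py (segment : String) (out : List String) : Prop := out = segment_tokens_py_alt segment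
instance (segment : String) (out : List String) : Decidable (Spec_segment_tokens_py segment out) := by unfold Spec_segment_tokens_py; infer_instance

-- ===== CLAIM (what is proved, stated in full; the proofs are below) =====
def Claim_equal_segment_tokens_py : Prop := ∀ (segment : String), Dom_segment_tokens_py segment → Spec_segment_tokens_py segment (segment_tokens_py segment)

-- ===== LEMMAS AND PROOFS =====

theorem pvGoB_none (s : List Char) (m : Bool) (h : pvSplitFirst s = none) :
    pvGoB s m = [if m then PySem.Chars.strip s else s] := by
  rw [pvGoB]
  split
  · rfl
  · next pre d post h' => rw [h'] at h; cases h

theorem pvGoB_some (s pre post : List Char) (d : Char) (m : Bool)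
    (h : pvSplitFirst s = some (pre, d, post)) :
    pvGoB s m =
      (if d = ']' then PySem.Chars.strip pre else pre) :: pvGoB post (d = '[') := by
  rw [pvGoB]
  split
  · next h' => rw [h'] at h; cases h
  · next pre' d' post' h' =>
    rw [h'] at h
    simp only [Option.some.injEq, Prod.mk.injEq] at h
    obtain ⟨h1, h2, h3⟩ := h
    subst h1; subst h2; subst h3
    rfl

theorem pvSplitFirst_append (buf : List Char)
    (h : ∀ c ∈ buf, ¬(c = '[' ∨ c = ']')) (s : List Char) :
    pvSplitFirst (buf ++ s) =
      (pvSplitFirst s).map (fun p => (buf ++ p.1, p.2.1, p.2.2)) := by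
  induction buf with
  | nil => cases hs : pvSplitFirst s <;> simp [hs]
  | cons c rest ih =>
    have hc : ¬(c = '[' ∨ c = ']') := h c (by simp)
    have hrest := ih (fun x hx => h x (by simp [hx]))
    simp only [List.cons_append, pvSplitFirst, hc, if_false, hrest]
    cases hs : pvSplitFirst s <;> simp

-- finalize A's loop state into its token list
def pvFinishA (st : List (List Char) × List Char × Bool) : List (List Char) :=
  (if st.2.1 ≠ [] then
      st.1 ++ [if st.2.2 then PySem.Chars.strip st.2.1 else st.2.1]
   else st.1).filter (· ≠ [])

theorem pvStrip_nil : PySem.Chars.strip ([] : List Char) = [] := by decide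

theorem pvKey :
    ∀ (s buf : List Char) (mode : Bool) (res : List (List Char)),
      (∀ c ∈ buf, ¬(c = '[' ∨ c = ']')) →
      pvFinishA (List.foldl pvStepA (res, buf, mode) s)
        = res.filter (· ≠ []) ++ (pvGoB (buf ++ s) mode).filter (· ≠ []) := by
  intro s
  induction s with
  | nil =>
    intro buf mode res h
    have hsplit : pvSplitFirst buf = none := by
      have := pvSplitFirst_append buf h []
      simpa [pvSplitFirst] using this
    rw [List.append_nil, pvGoB_none buf mode hsplit]
    by_cases hb : buf = []
    · subst hb
      cases mode <;> simp [pvFinishA, pvStrip_nil]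
    · simp [pvFinishA, List.foldl, hb, List.filter_append]
  | cons c s' ih =>
    intro buf mode res h
    by_cases hopen : c = '['
    · subst hopen
      have hstep : pvStepA (res, buf, mode) '[' =
          ((if buf ≠ [] then res ++ [buf] else res), [], true) := by
        simp [pvStepA]
      have hsplit : pvSplitFirst (buf ++ '[' :: s') = some (buf, '[', s') := by
        rw [pvSplitFirst_append buf h]
        simp [pvSplitFirst]
      rw [List.foldl_cons, hstep,
        ih [] true _ (by intro x hx; simp at hx),
        pvGoB_some _ _ _ _ mode hsplit]
      by_cases hb : buf = []
      · subst hb; simp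
      · simp [hb, List.filter_append]
    · by_cases hclose : c = ']'
      · subst hclose
        have hstep : pvStepA (res, buf, mode) ']' =
            ((if PySem.Chars.strip buf ≠ [] then
                res ++ [PySem.Chars.strip buf] else res), [], false) := by
          simp [pvStepA]
        have hsplit : pvSplitFirst (buf ++ ']' :: s') = some (buf, ']', s') := by
          rw [pvSplitFirst_append buf h]
          simp [pvSplitFirst]
        rw [List.foldl_cons, hstep,
          ih [] false _ (by intro x hx; simp at hx),
          pvGoB_some _ _ _ _ mode hsplit]
        by_cases hb : PySem.Chars.strip buf = []
        · simp [hb]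
        · simp [hb, List.filter_append]
      · have hstep : pvStepA (res, buf, mode) c = (res, buf ++ [c], mode) := by
          simp [pvStepA, hopen, hclose]
        rw [List.foldl_cons, hstep,
          ih (buf ++ [c]) mode res
            (by intro x hx
                rcases List.mem_append.mp hx with hx | hx
                · exact h x hx
                · simp at hx; subst hx; tauto),
          List.append_assoc]
        simp

-- ===== VERDICT (by name: the statement is the Claim_ definition above) =====
theorem segment_tokens_py_spec : Claim_equal_segment_tokens_py := by
  intro segment _
  unfold Spec_segment_tokens_py segment_tokens_py segment_tokens_py_alt
  by_cases hs : PySem.Chars.strip segment.toList = []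
  · rw [hs]
    have h0 : pvGoB [] false = [[]] := by rw [pvGoB_none [] false rfl]; rfl
    simp [h0]
  · have hkey := pvKey (PySem.Chars.strip segment.toList) [] false []
      (by intro x hx; simp at hx)
    simp only [List.nil_append, List.filter_nil, List.nil_append] at hkey
    simp only [hs, if_false]
    show (pvFinishA ((PySem.Chars.strip segment.toList).foldl pvStepA ([], [], false))).map
        (fun l => String.ofList l)
      = (((pvGoB (PySem.Chars.strip segment.toList) false).filter (· ≠ [])).map
        (fun l => String.ofList l))
    rw [hkey]
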